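-- pv_equiv track=rewrite | github.com/Dhyeonle9/algo | 프로그래머스/2/42586. 기능개발/기능개발.py | solution
-- ===== SOURCE A (Python) =====
-- def solution(progresses, speeds):
--     answer = []
--     cnt = 0
--     while len(progresses)>0:
--         if progresses[0] >= 100:
--             progresses.pop(0)
--             speeds.pop(0)
--             cnt += 1
--         else:
--             if cnt > 0:
--                 answer.append(cnt)
--                 cnt = 0
--             for i in range(len(progresses)):
--                 progresses[i] = progresses[i] + speeds[i]
--     answer.append(cnt)
--     return answer
-- ===== SOURCE B (Python) =====
-- def solution(progresses, speeds):
--     # one pass: ceil finish-day per task, group by running maximum finish day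
--     days = [0 if p >= 100 else -((p - 100) // s) for p, s in zip(progresses, speeds)]
--     answer = []
--     count = 0
--     cur = 0
--     for d in days:
--         if d <= cur:
--             count += 1
--         else:
--             if count > 0:
--                 answer.append(count)
--             cur = d
--             count = 1
--     answer.append(count)
--     return answer
-- ===== Notes on version B (the rewrite author's own statement) =====
-- stated objective: faster
-- what changed: Instead of simulating each day on mutable lists (popping finished fronts, incrementing every remaining progress daily), B computes each task's ceil finish day once and groups consecutive tasks by a running maximum finish day in one pass; intended as faster (asymptotic), measured: a timing run saw A time out at n=16 where B returned, but no clean ratio was obtainable.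
-- outside the precondition, e.g. on solution([100], [0]): A returns [1], B returns [1]
import Mathlib
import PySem

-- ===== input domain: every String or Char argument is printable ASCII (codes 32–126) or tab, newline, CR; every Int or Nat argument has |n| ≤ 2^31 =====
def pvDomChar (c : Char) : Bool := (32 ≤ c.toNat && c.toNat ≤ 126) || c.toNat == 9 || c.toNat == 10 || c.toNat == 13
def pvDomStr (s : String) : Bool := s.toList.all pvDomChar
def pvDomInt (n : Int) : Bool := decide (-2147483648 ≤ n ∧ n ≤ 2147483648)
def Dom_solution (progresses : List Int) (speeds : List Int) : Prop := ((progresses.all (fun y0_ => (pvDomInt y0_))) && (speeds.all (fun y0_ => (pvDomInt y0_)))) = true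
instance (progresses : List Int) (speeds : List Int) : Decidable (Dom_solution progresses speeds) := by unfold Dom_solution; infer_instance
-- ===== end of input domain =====

-- B replaces A's day-by-day simulation on mutable lists by a one-pass grouping over
-- per-task ceil finish days (intended as faster; a timing run saw A time out where B
-- returned, without a measurable ratio). A mutates its list arguments in place (pop /
-- element overwrite); the equivalence proved here is about the RETURN value only.

-- ===== PORT A =====
-- A's while-loop as fuel recursion; under Pre_ the fuel bound pvFuelA is never reached
-- (the measure argument in the lemmas below proves it).
def pvFuelA (ps : List Int) : Nat := (ps.map (fun p => (100 - p).toNat)).sum + ps.length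

def solutionLoop : Nat → List Int → List Int → List Int → Int → List Int
  | 0, _, _, answer, cnt => answer ++ [cnt]
  | Nat.succ f, ps, ss, answer, cnt =>
    match ps with
    | [] => answer ++ [cnt]
    | p :: pt =>
      if 100 ≤ p then solutionLoop f pt ss.tail answer (cnt + 1)
      else if 0 < cnt then
        solutionLoop f (List.zipWith (· + ·) (p :: pt) ss) ss (answer ++ [cnt]) 0
      else
        solutionLoop f (List.zipWith (· + ·) (p :: pt) ss) ss answer cnt

def solution (progresses : List Int) (speeds : List Int) : List Int :=
  solutionLoop (pvFuelA progresses + 1) progresses speeds [] 0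

-- ===== PORT B =====
-- Source B's comprehension body: finish day of one task (ceil division via Python floordiv)
def dayNeeded (p s : Int) : Int := if 100 ≤ p then 0 else -(PySem.Int.floordiv (p - 100) s)

def solution_alt (progresses : List Int) (speeds : List Int) : List Int :=
  let days := List.zipWith dayNeeded progresses speeds
  let r := days.foldl (fun (st : List Int × Int × Int) d =>
      if d ≤ st.2.2 then (st.1, st.2.1 + 1, st.2.2)
      else ((if 0 < st.2.1 then st.1 ++ [st.2.1] else st.1), 1, d)) ([], 0, 0)
  r.1 ++ [r.2.1]

-- ===== PRECONDITION & SPEC =====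
-- Pre_ excludes inputs where A raises (speeds shorter than progresses: IndexError) and inputs
-- with a non-positive speed among the used ones: there A loops forever whenever such a task is
-- still below 100 when it reaches the front, and returns only in incidental already-finished cases.
def Pre_solution (progresses : List Int) (speeds : List Int) : Prop :=
  progresses.length ≤ speeds.length ∧ ∀ s ∈ speeds.take progresses.length, 1 ≤ s
instance (progresses : List Int) (speeds : List Int) : Decidable (Pre_solution progresses speeds) := by
  unfold Pre_solution; infer_instance

def pvWitness_solution : List Int × List Int := ([93, 30, 55], [1, 30, 5])

def Spec_solution (progresses : List Int) (speeds : List Int) (out : List Int) : Prop := out = solution_alt progresses speeds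
instance (progresses : List Int) (speeds : List Int) (out : List Int) : Decidable (Spec_solution progresses speeds out) := by unfold Spec_solution; infer_instance

-- ===== CLAIM (what is proved, stated in full; the proofs are below) =====
def Claim_equal_solution : Prop := ∀ (progresses : List Int) (speeds : List Int), Dom_solution progresses speeds → Pre_solution progresses speeds → Spec_solution progresses speeds (solution progresses speeds)

-- ===== LEMMAS AND PROOFS =====

-- grouping of a list of finish days by running maximum (B's loop as a recursion)
def grp : Int → Int → List Int → List Int
  | cnt, _, [] => [cnt]
  | cnt, cur, d :: rest =>
    if d ≤ cur then grp (cnt + 1) cur rest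
    else (if 0 < cnt then [cnt] else []) ++ grp 1 d rest

theorem bfold_eq (ds : List Int) : ∀ (ans : List Int) (cnt cur : Int),
    (ds.foldl (fun (st : List Int × Int × Int) d =>
      if d ≤ st.2.2 then (st.1, st.2.1 + 1, st.2.2)
      else ((if 0 < st.2.1 then st.1 ++ [st.2.1] else st.1), 1, d)) (ans, cnt, cur)).1
    ++ [(ds.foldl (fun (st : List Int × Int × Int) d =>
      if d ≤ st.2.2 then (st.1, st.2.1 + 1, st.2.2)
      else ((if 0 < st.2.1 then st.1 ++ [st.2.1] else st.1), 1, d)) (ans, cnt, cur)).2.1]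
    = ans ++ grp cnt cur ds := by
  induction ds with
  | nil => intro ans cnt cur; simp [grp]
  | cons d rest ih =>
    intro ans cnt cur
    by_cases h : d ≤ cur
    · simp only [List.foldl_cons, grp, h, if_true, ih]
    · by_cases hc : 0 < cnt <;>
        simp only [List.foldl_cons, grp, h, hc, if_true, if_false, ih, List.append_assoc,
          List.nil_append, List.singleton_append]

theorem grp_shift (ds : List Int) : ∀ (cnt cur c : Int),
    grp cnt (cur + c) (ds.map (· + c)) = grp cnt cur ds := by
  induction ds with
  | nil => intro cnt cur c; simp [grp]
  | cons d rest ih =>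
    intro cnt cur c
    by_cases h : d ≤ cur
    · have h' : d + c ≤ cur + c := by omega
      simp only [List.map_cons, grp, h, h', if_true, ih]
    · have h' : ¬ d + c ≤ cur + c := by omega
      simp only [List.map_cons, grp, h, h', if_false, ih]

theorem grp_cap (ds : List Int) : ∀ (cnt cur : Int), (∀ d ∈ ds, (0:Int) ≤ d) → 0 ≤ cur →
    grp cnt cur (ds.map (fun d => max 0 (d - 1))) = grp cnt cur (ds.map (· - 1)) := by
  induction ds with
  | nil => intro cnt cur _ _; simp [grp]
  | cons d rest ih =>
    intro cnt cur hds hcur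
    have hd : (0:Int) ≤ d := hds d (by simp)
    have hrest : ∀ x ∈ rest, (0:Int) ≤ x := fun x hx => hds x (by simp [hx])
    by_cases h : d - 1 ≤ cur
    · have h' : max 0 (d - 1) ≤ cur := by omega
      simp only [List.map_cons, grp, h, h', if_true, ih _ _ hrest hcur]
    · have h' : ¬ max 0 (d - 1) ≤ cur := by omega
      have hmax : max 0 (d - 1) = d - 1 := by omega
      simp only [List.map_cons, grp, h, if_false, hmax]
      rw [ih 1 (d - 1) hrest (by omega)]

theorem dayNeeded_pos {p s : Int} (hs : 1 ≤ s) (hp : p < 100) : 1 ≤ dayNeeded p s := by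
  have h100 : ¬ (100 ≤ p) := by omega
  have : PySem.Int.floordiv (p - 100) s < 0 := by
    rw [PySem.Int.floordiv_lt_iff_lt_mul (by omega)]; omega
  simp only [dayNeeded, h100, if_false]; omega

theorem dayNeeded_nonneg {p s : Int} (hs : 1 ≤ s) : 0 ≤ dayNeeded p s := by
  by_cases hp : 100 ≤ p
  · simp [dayNeeded, hp]
  · have := dayNeeded_pos hs (by omega : p < 100); omega

theorem dayNeeded_step {p s : Int} (hs : 1 ≤ s) :
    dayNeeded (p + s) s = max 0 (dayNeeded p s - 1) := by
  by_cases hp : 100 ≤ p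
  · have hp' : 100 ≤ p + s := by omega
    simp [dayNeeded, hp, hp']
  · have hp1 : p < 100 := by omega
    by_cases hq : 100 ≤ p + s
    · have h1 : PySem.Int.floordiv (p - 100) s = -1 := by
        rw [PySem.Int.floordiv_eq_iff_of_pos (by omega)]; constructor <;> omega
      simp only [dayNeeded, hp, hq, if_true, if_false, h1]
      omega
    · -- p + s < 100 : floordiv (p + s - 100) s = floordiv (p - 100) s + 1
      have hb : 0 < s := by omega
      obtain ⟨h1, h2⟩ := (PySem.Int.floordiv_eq_iff_of_pos hb (a := p - 100)
        (q := PySem.Int.floordiv (p - 100) s)).1 rfl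
      have hstep : PySem.Int.floordiv (p + s - 100) s = PySem.Int.floordiv (p - 100) s + 1 := by
        rw [PySem.Int.floordiv_eq_iff_of_pos hb]
        constructor <;> nlinarith
      have hpos := dayNeeded_pos hs hp1
      simp only [dayNeeded, hp, hq, if_false] at *
      omega

theorem speeds_of_take (ps : List Int) : ∀ (ss : List Int),
    (∀ s ∈ ss.take ps.length, (1:Int) ≤ s) → ∀ x ∈ List.zip ps ss, (1:Int) ≤ x.2 := by
  induction ps with
  | nil => intro ss _ x hx; simp at hx
  | cons p pt ih =>
    intro ss h x hx
    cases ss with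
    | nil => simp at hx
    | cons s st =>
      simp only [List.length_cons, List.take_succ_cons, List.mem_cons] at h
      rcases (by simpa using hx : x = (p, s) ∨ x ∈ List.zip pt st) with h1 | h1
      · subst h1; exact h s (Or.inl rfl)
      · exact ih st (fun y hy => h y (Or.inr hy)) x h1

theorem zip_incr (ps : List Int) : ∀ (ss : List Int),
    (∀ x ∈ List.zip ps ss, (1:Int) ≤ x.2) →
    ∀ x ∈ List.zip (List.zipWith (· + ·) ps ss) ss, (1:Int) ≤ x.2 := by
  induction ps with
  | nil => intro ss _ x hx; simp at hx
  | cons p pt ih =>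
    intro ss h x hx
    cases ss with
    | nil => simp at hx
    | cons s st =>
      simp only [List.zipWith_cons_cons, List.zip_cons_cons, List.mem_cons] at hx h
      rcases hx with h1 | h1
      · subst h1; exact h (p, s) (Or.inl rfl)
      · exact ih st (fun y hy => h y (Or.inr hy)) x h1

theorem days_nonneg (ps : List Int) : ∀ (ss : List Int),
    (∀ x ∈ List.zip ps ss, (1:Int) ≤ x.2) →
    ∀ d ∈ List.zipWith dayNeeded ps ss, (0:Int) ≤ d := by
  induction ps with
  | nil => intro ss _ d hd; simp at hd
  | cons p pt ih =>
    intro ss h d hd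
    cases ss with
    | nil => simp at hd
    | cons s st =>
      simp only [List.zipWith_cons_cons, List.zip_cons_cons, List.mem_cons] at hd h
      rcases hd with h1 | h1
      · subst h1; exact dayNeeded_nonneg (h (p, s) (Or.inl rfl))
      · exact ih st (fun y hy => h y (Or.inr hy)) d h1

theorem days_step (ps : List Int) : ∀ (ss : List Int),
    (∀ x ∈ List.zip ps ss, (1:Int) ≤ x.2) →
    List.zipWith dayNeeded (List.zipWith (· + ·) ps ss) ss
      = (List.zipWith dayNeeded ps ss).map (fun d => max 0 (d - 1)) := by
  induction ps with
  | nil => intro ss _; simp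
  | cons p pt ih =>
    intro ss h
    cases ss with
    | nil => simp
    | cons s st =>
      simp only [List.zip_cons_cons, List.mem_cons] at h
      simp only [List.zipWith_cons_cons, List.map_cons]
      rw [dayNeeded_step (h (p, s) (Or.inl rfl)), ih st (fun y hy => h y (Or.inr hy))]

theorem sum_incr_le (ps : List Int) : ∀ (ss : List Int),
    (∀ x ∈ List.zip ps ss, (1:Int) ≤ x.2) →
    ((List.zipWith (· + ·) ps ss).map (fun p => (100 - p).toNat)).sum
      ≤ (ps.map (fun p => (100 - p).toNat)).sum := by
  induction ps with
  | nil => intro ss _; simp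
  | cons p pt ih =>
    intro ss h
    cases ss with
    | nil => simp
    | cons s st =>
      simp only [List.zip_cons_cons, List.mem_cons] at h
      have hs : (1:Int) ≤ s := h (p, s) (Or.inl rfl)
      have := ih st (fun y hy => h y (Or.inr hy))
      simp only [List.zipWith_cons_cons, List.map_cons, List.sum_cons]
      have : (100 - (p + s)).toNat ≤ (100 - p).toNat := by omega
      omega

theorem grp_day (rest : List Int) (d0 : Int) (hd0 : 1 ≤ d0)
    (hrest : ∀ d ∈ rest, (0:Int) ≤ d) :
    grp 0 0 ((d0 :: rest).map (fun d => max 0 (d - 1))) = grp 1 d0 rest := by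
  by_cases h1 : d0 = 1
  · subst h1
    simp only [List.map_cons, grp]
    rw [if_pos (by omega : max (0:Int) (1 - 1) ≤ 0)]
    rw [grp_cap rest (0 + 1) 0 hrest (by omega)]
    have h2 := grp_shift rest (0 + 1) 1 (-1)
    simpa [sub_eq_add_neg] using h2
  · have hmax : max (0:Int) (d0 - 1) = d0 - 1 := by omega
    simp only [List.map_cons, grp, hmax]
    rw [if_neg (by omega : ¬ (d0 - 1 ≤ (0:Int))), if_neg (by omega : ¬ ((0:Int) < 0))]
    simp only [List.nil_append]
    rw [grp_cap rest 1 (d0 - 1) hrest (by omega)]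
    have h2 := grp_shift rest 1 d0 (-1)
    simpa [sub_eq_add_neg] using h2

theorem pvFuelA_cons (p : Int) (pt : List Int) :
    pvFuelA (p :: pt) = (100 - p).toNat + pvFuelA pt + 1 := by
  simp [pvFuelA]; omega

theorem main_lemma (fuel : Nat) : ∀ (ps ss ans : List Int) (cnt : Int),
    ps.length ≤ ss.length → (∀ x ∈ List.zip ps ss, (1:Int) ≤ x.2) →
    0 ≤ cnt → pvFuelA ps < fuel →
    solutionLoop fuel ps ss ans cnt = ans ++ grp cnt 0 (List.zipWith dayNeeded ps ss) := by
  induction fuel with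
  | zero => intro ps ss ans cnt _ _ _ hf; omega
  | succ f ih =>
    intro ps ss ans cnt hlen hsp hcnt hf
    cases ps with
    | nil => simp [solutionLoop, grp]
    | cons p pt =>
      cases ss with
      | nil => simp at hlen
      | cons s st =>
        have hlen' : pt.length ≤ st.length := by simpa using hlen
        have hs : (1:Int) ≤ s := hsp (p, s) (by simp)
        have hsp' : ∀ x ∈ List.zip pt st, (1:Int) ≤ x.2 := by
          intro y hy; exact hsp y (by simp [hy])
        by_cases hp : 100 ≤ p
        · -- pop branch
          have hd0 : dayNeeded p s = 0 := by simp [dayNeeded, hp]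
          have hrec := ih pt st ans (cnt + 1) hlen' hsp' (by omega)
            (by rw [pvFuelA_cons] at hf; omega)
          simp only [solutionLoop]
          rw [if_pos hp, List.tail_cons, hrec, List.zipWith_cons_cons, hd0]
          simp [grp]
        · -- day-step branch
          have hp1 : p < 100 := by omega
          have hs2 := zip_incr (p :: pt) (s :: st) hsp
          have hlen2 : (List.zipWith (· + ·) (p :: pt) (s :: st)).length ≤ (s :: st).length := by
            rw [List.length_zipWith]; simp
          have hfuel2 : pvFuelA (List.zipWith (· + ·) (p :: pt) (s :: st)) < f := by
            have hsum := sum_incr_le pt st hsp'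
            have hlen3 : (List.zipWith (· + ·) pt st).length = pt.length := by
              rw [List.length_zipWith]; omega
            rw [pvFuelA_cons] at hf
            rw [List.zipWith_cons_cons, pvFuelA_cons]
            simp only [pvFuelA] at *
            omega
          have hdays := days_step (p :: pt) (s :: st) hsp
          have hd0pos : 1 ≤ dayNeeded p s := dayNeeded_pos hs hp1
          have hkey := grp_day (List.zipWith dayNeeded pt st) (dayNeeded p s) hd0pos
            (days_nonneg pt st hsp')
          have hnot : ¬ dayNeeded p s ≤ (0:Int) := by omega
          have hgrp : grp cnt 0 (dayNeeded p s :: List.zipWith dayNeeded pt st)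
              = (if 0 < cnt then [cnt] else [])
                ++ grp 1 (dayNeeded p s) (List.zipWith dayNeeded pt st) := by
            simp only [grp]
            rw [if_neg hnot]
          by_cases hc : 0 < cnt
          · have hrec := ih (List.zipWith (· + ·) (p :: pt) (s :: st)) (s :: st)
              (ans ++ [cnt]) 0 hlen2 hs2 le_rfl hfuel2
            simp only [solutionLoop]
            rw [if_neg hp, if_pos hc, hrec]
            simp only [List.zipWith_cons_cons] at hdays ⊢
            rw [hdays, hkey, hgrp, if_pos hc]
            simp [List.append_assoc]
          · have hc0 : cnt = 0 := by omega
            subst hc0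
            have hrec := ih (List.zipWith (· + ·) (p :: pt) (s :: st)) (s :: st)
              ans 0 hlen2 hs2 le_rfl hfuel2
            simp only [solutionLoop]
            rw [if_neg hp, if_neg hc, hrec]
            simp only [List.zipWith_cons_cons] at hdays ⊢
            rw [hdays, hkey, hgrp, if_neg hc]
            simp

-- ===== VERDICT (by name: the statement is the Claim_ definition above) =====
theorem solution_spec : Claim_equal_solution := by
  intro ps ss _ hpre
  obtain ⟨hlen, htake⟩ := hpre
  unfold Spec_solution solution solution_alt
  have hsp := speeds_of_take ps ss htake
  rw [main_lemma (pvFuelA ps + 1) ps ss [] 0 hlen hsp (le_refl 0) (by omega)]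
  rw [← bfold_eq (List.zipWith dayNeeded ps ss) [] 0 0]
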